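-- pv_equiv track=rewrite | github.com/kcortes133/EdgePrediction | editICNodes.py | group_nodes_by_ontology
-- ===== SOURCE A (Python) =====
-- ONTOLOGIES = {
--     "GO": "http://purl.obolibrary.org/obo/GO_",
--     "HP": "http://purl.obolibrary.org/obo/HP_",
--     "MONDO": "http://purl.obolibrary.org/obo/MONDO_",
-- }
--
-- def group_nodes_by_ontology(nodes):
--     """
--     Group node IRIs by ontology prefix.
--     Returns: dict[ontology] = [iri1, iri2, ...]
--     """
--     ont_groups = {ont: [] for ont in ONTOLOGIES}
--     curieStart = "http://purl.obolibrary.org/obo/"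
--     for node_id in nodes:
--         iri = node_id
--         for ont, prefix in ONTOLOGIES.items():
--             if iri.startswith(ont):
--                 ont_groups[ont].append(curieStart+iri.replace(":", "_"))
--
--     return ont_groups
-- ===== SOURCE B (Python) =====
-- ONTOLOGIES = {
--     "GO": "http://purl.obolibrary.org/obo/GO_",
--     "HP": "http://purl.obolibrary.org/obo/HP_",
--     "MONDO": "http://purl.obolibrary.org/obo/MONDO_",
-- }
--
-- def group_nodes_by_ontology(nodes):
--     """
--     Group node IRIs by ontology prefix.
--     Returns: dict[ontology] = [iri1, iri2, ...]
--     """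
--     nodes = list(nodes)
--     curieStart = "http://purl.obolibrary.org/obo/"
--     return {
--         ont: [curieStart + n.replace(":", "_") for n in nodes if n.startswith(ont)]
--         for ont in ONTOLOGIES
--     }
-- ===== Notes on version B (the rewrite author's own statement) =====
-- stated objective: idiomatic
-- what changed: Replaces the single pass with a nested per-node loop over the ontology dict (appending into pre-initialized buckets) by a dict comprehension that builds each bucket in one filtering scan per ontology.
import Mathlib
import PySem

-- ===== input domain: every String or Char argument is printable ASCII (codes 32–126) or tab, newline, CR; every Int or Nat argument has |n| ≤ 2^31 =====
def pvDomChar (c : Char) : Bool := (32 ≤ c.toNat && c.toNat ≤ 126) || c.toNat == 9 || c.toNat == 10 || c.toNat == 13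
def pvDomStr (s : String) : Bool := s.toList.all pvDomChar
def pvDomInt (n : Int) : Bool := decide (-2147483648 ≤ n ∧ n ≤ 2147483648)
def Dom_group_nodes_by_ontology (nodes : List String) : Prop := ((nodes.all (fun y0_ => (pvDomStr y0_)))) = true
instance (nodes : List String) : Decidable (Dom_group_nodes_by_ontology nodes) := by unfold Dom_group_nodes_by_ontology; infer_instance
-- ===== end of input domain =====

-- B replaces A's per-node loop appending into pre-initialized dict buckets by one
-- filtering comprehension per ontology (more idiomatic; same cost).


-- ===== PORT A =====
-- the module constant ONTOLOGIES, as an insertion-ordered association list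
def pvOntologies : List (String × String) :=
  [("GO", "http://purl.obolibrary.org/obo/GO_"),
   ("HP", "http://purl.obolibrary.org/obo/HP_"),
   ("MONDO", "http://purl.obolibrary.org/obo/MONDO_")]

def pvCurieStart : String := "http://purl.obolibrary.org/obo/"

def group_nodes_by_ontology (nodes : List String) : List (String × List String) :=
  -- ont_groups = {ont: [] for ont in ONTOLOGIES}
  let init : PySem.Dict String (List String) :=
    PySem.Dict.ofList (pvOntologies.map (fun p => (p.1, ([] : List String))))
  -- for node_id in nodes: iri = node_id; for ont, prefix in ONTOLOGIES.items():
  --   if iri.startswith(ont): ont_groups[ont].append(curieStart + iri.replace(":", "_"))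
  let final := nodes.foldl (fun d node_id =>
    pvOntologies.foldl (fun d p =>
      if PySem.Str.startswith node_id p.1 then
        d.modify p.1 [] (fun l => l ++ [pvCurieStart ++ PySem.Str.replace node_id ":" "_"])
      else d) d) init
  final.items

-- ===== PORT B =====
def group_nodes_by_ontology_alt (nodes : List String) : List (String × List String) :=
  pvOntologies.map (fun p =>
    (p.1, (nodes.filter (fun n => PySem.Str.startswith n p.1)).map
            (fun n => pvCurieStart ++ PySem.Str.replace n ":" "_")))

-- ===== PRECONDITION & SPEC =====
def Spec_group_nodes_by_ontology (nodes : List String) (out : List (String × List String)) : Prop := out = group_nodes_by_ontology_alt nodes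
instance (nodes : List String) (out : List (String × List String)) : Decidable (Spec_group_nodes_by_ontology nodes out) := by unfold Spec_group_nodes_by_ontology; infer_instance

-- ===== CLAIM (what is proved, stated in full; the proofs are below) =====
def Claim_equal_group_nodes_by_ontology : Prop := ∀ (nodes : List String), Dom_group_nodes_by_ontology nodes → Spec_group_nodes_by_ontology nodes (group_nodes_by_ontology nodes)

-- ===== LEMMAS AND PROOFS =====

-- the converted IRI
def pvConv (n : String) : String := pvCurieStart ++ PySem.Str.replace n ":" "_"

-- the bucket B builds for one ontology key
def pvBucket (ont : String) (nodes : List String) : List String :=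
  (nodes.filter (fun n => PySem.Str.startswith n ont)).map pvConv

-- one pass of A's inner loop over the three ontologies, on the invariant dict shape
lemma pvInner (n : String) (g h m : List String) :
    pvOntologies.foldl (fun d p =>
        if PySem.Str.startswith n p.1 then
          d.modify p.1 [] (fun l => l ++ [pvConv n])
        else d)
      (PySem.Dict.mk [("GO", g), ("HP", h), ("MONDO", m)])
    = PySem.Dict.mk
        [("GO", g ++ if PySem.Str.startswith n "GO" then [pvConv n] else []),
         ("HP", h ++ if PySem.Str.startswith n "HP" then [pvConv n] else []),
         ("MONDO", m ++ if PySem.Str.startswith n "MONDO" then [pvConv n] else [])] := by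
  by_cases hg : PySem.Chars.startswith n.toList ['G', 'O'] <;>
  by_cases hh : PySem.Chars.startswith n.toList ['H', 'P'] <;>
  by_cases hm : PySem.Chars.startswith n.toList ['M', 'O', 'N', 'D', 'O'] <;>
    simp [pvOntologies, hg, hh, hm, PySem.Dict.modify,
      PySem.Dict.get?, PySem.Dict.getD, PySem.Dict.insert, PySem.Dict.contains]

-- A's whole loop appends exactly B's buckets to whatever the buckets already hold
lemma pvLoop_eq (nodes : List String) (g h m : List String) :
    nodes.foldl (fun d node_id =>
      pvOntologies.foldl (fun d p =>
        if PySem.Str.startswith node_id p.1 then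
          d.modify p.1 [] (fun l => l ++ [pvConv node_id])
        else d) d)
      (PySem.Dict.mk [("GO", g), ("HP", h), ("MONDO", m)])
    = PySem.Dict.mk [("GO", g ++ pvBucket "GO" nodes),
                     ("HP", h ++ pvBucket "HP" nodes),
                     ("MONDO", m ++ pvBucket "MONDO" nodes)] := by
  induction nodes generalizing g h m with
  | nil => simp [pvBucket]
  | cons n ns ih =>
    rw [List.foldl_cons, pvInner, ih]
    simp only [pvBucket, List.filter_cons]
    split_ifs <;> simp

-- ===== VERDICT (by name: the statement is the Claim_ definition above) =====
theorem group_nodes_by_ontology_spec : Claim_equal_group_nodes_by_ontology := by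
  intro nodes _
  unfold Spec_group_nodes_by_ontology group_nodes_by_ontology group_nodes_by_ontology_alt
  have hinit : PySem.Dict.ofList (pvOntologies.map (fun p => (p.1, ([] : List String))))
      = PySem.Dict.mk [("GO", []), ("HP", []), ("MONDO", [])] := by decide
  simp only [hinit]
  have := pvLoop_eq nodes [] [] []
  simp only [pvConv] at this
  simp only [this]
  simp [pvOntologies, pvBucket, pvConv]
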